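-- pv_equiv track=rewrite | github.com/trung123456789/KingChess | HandleGame.py | state_list_func
-- ===== SOURCE A (Python) =====
-- import copy
--
-- def state_list_func(table_chess, p):
--     state_list = []
--     for i in range(0, len(table_chess)):
--         for j in range(0, len(table_chess)):
--             if table_chess[i][j] == "":
--                 temp = copy.deepcopy(table_chess)
--                 temp[i][j] = p
--                 state_list.append(temp)
--     return state_list
-- ===== SOURCE B (Python) =====
-- def state_list_func(table_chess, p):
--     # Right-to-left accumulation: maintain the suffix of rows seen so far and
--     # the states for that suffix; each new head row contributes its own filled
--     # variants and is prepended to every previously built suffix state.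
--     n = len(table_chess)
--     suffix = []
--     states = []
--     for head in reversed(table_chess):
--         states = ([[head[:j] + [p] + head[j + 1:]] + suffix
--                    for j in range(n) if head[j] == ""]
--                   + [[head] + s for s in states])
--         suffix = [head] + suffix
--     return states
-- ===== Notes on version B (the rewrite author's own statement) =====
-- stated objective: alternative
-- what changed: B replaces A's index-driven double scan with per-cell deepcopies of the whole board by a single right-to-left fold over the rows that maintains the suffix of rows and the states for that suffix, sharing row objects between the emitted states instead of copying every row of every state.
import Mathlib
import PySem

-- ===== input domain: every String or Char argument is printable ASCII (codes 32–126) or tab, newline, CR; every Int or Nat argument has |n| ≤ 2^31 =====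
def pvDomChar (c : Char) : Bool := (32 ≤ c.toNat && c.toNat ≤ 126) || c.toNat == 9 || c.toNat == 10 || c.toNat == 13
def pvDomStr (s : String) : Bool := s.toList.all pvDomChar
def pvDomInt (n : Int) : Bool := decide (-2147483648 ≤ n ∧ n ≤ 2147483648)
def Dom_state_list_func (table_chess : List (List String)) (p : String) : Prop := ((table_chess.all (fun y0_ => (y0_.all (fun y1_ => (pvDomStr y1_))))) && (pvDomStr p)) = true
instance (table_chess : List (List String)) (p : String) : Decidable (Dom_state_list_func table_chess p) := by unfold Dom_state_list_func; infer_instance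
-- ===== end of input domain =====

-- B replaces A's index-driven double scan with full-board deepcopies by a single
-- right-to-left accumulation over the rows, sharing the suffix/prefix rows between
-- states (return-value equivalence; neither program mutates its input).

-- ===== PORT A =====
-- reads table_chess[i][j] via pyGetD; the defaults are never reached inside Pre_ (all indices in range)
def state_list_func (table_chess : List (List String)) (p : String) : List (List (List String)) :=
  (PySem.List.pyRange 0 table_chess.length 1).foldl (fun state_list i =>
    (PySem.List.pyRange 0 table_chess.length 1).foldl (fun state_list j =>
      if PySem.List.pyGetD (PySem.List.pyGetD table_chess i []) j "" == "" then
        -- temp = deepcopy(table_chess); temp[i][j] = p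
        state_list ++ [PySem.List.pySetD table_chess i
          (PySem.List.pySetD (PySem.List.pyGetD table_chess i []) j p)]
      else state_list) state_list) []

-- ===== PORT B =====
-- 'for head in reversed(table_chess)' with state (suffix, states)
def state_list_func_alt (table_chess : List (List String)) (p : String) : List (List (List String)) :=
  (table_chess.reverse.foldl
    (fun (st : List (List String) × List (List (List String))) head =>
      (head :: st.1,
       ((PySem.List.pyRange 0 (table_chess.length : Int) 1).filter
           (fun j => PySem.List.pyGetD head j "" == "")).map
         (fun j => (PySem.List.slice head none (some j) ++ [p]
                    ++ PySem.List.slice head (some (j + 1)) none) :: st.1)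
       ++ st.2.map (fun s => head :: s)))
    ([], [])).2

-- ===== PRECONDITION & SPEC =====
-- A raises IndexError on table_chess[i][j] when some row is shorter than the number of rows.
def Pre_state_list_func (table_chess : List (List String)) (p : String) : Prop :=
  ∀ row ∈ table_chess, table_chess.length ≤ row.length
instance (table_chess : List (List String)) (p : String) : Decidable (Pre_state_list_func table_chess p) := by unfold Pre_state_list_func; infer_instance
def pvWitness_state_list_func : List (List String) × String := ([["", "x"], ["y", ""]], "p")

def Spec_state_list_func (table_chess : List (List String)) (p : String) (out : List (List (List String))) : Prop := out = state_list_func_alt table_chess p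
instance (table_chess : List (List String)) (p : String) (out : List (List (List String))) : Decidable (Spec_state_list_func table_chess p out) := by unfold Spec_state_list_func; infer_instance

-- ===== CLAIM (what is proved, stated in full; the proofs are below) =====
def Claim_equal_state_list_func : Prop := ∀ (table_chess : List (List String)) (p : String), Dom_state_list_func table_chess p → Pre_state_list_func table_chess p → Spec_state_list_func table_chess p (state_list_func table_chess p)

-- ===== LEMMAS AND PROOFS =====

-- the boards emitted by B's head row, given the suffix of rows below it
def pvHere (n : Int) (p : String) (head : List String) (suffix : List (List String)) : List (List (List String)) :=
  ((PySem.List.pyRange 0 n 1).filter (fun j => PySem.List.pyGetD head j "" == "")).map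
    (fun j => (PySem.List.slice head none (some j) ++ [p]
               ++ PySem.List.slice head (some (j + 1)) none) :: suffix)

-- structural recursion computing B's result row by row
def pvG (n : Int) (p : String) : List (List String) → List (List (List String))
  | [] => []
  | h :: tl => pvHere n p h tl ++ (pvG n p tl).map (fun s => h :: s)

theorem pv_alt_eq_pvG (t : List (List String)) (p : String) :
    state_list_func_alt t p = pvG (t.length : Int) p t := by
  unfold state_list_func_alt
  rw [List.foldl_reverse]
  have key : ∀ (l : List (List String)),
      l.foldr (fun head (st : List (List String) × List (List (List String))) =>
        (head :: st.1, pvHere (t.length : Int) p head st.1 ++ st.2.map (fun s => head :: s)))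
        ([], []) = (l, pvG (t.length : Int) p l) := by
    intro l
    induction l with
    | nil => simp [pvG]
    | cons h tl ih => simp [pvG, ih]
  exact congrArg Prod.snd (key t)

theorem pvG_eq_flat (n : Int) (p : String) (t : List (List String)) :
    pvG n p t = (List.range t.length).flatMap (fun k =>
      ((PySem.List.pyRange 0 n 1).filter
          (fun j => PySem.List.pyGetD (t.getD k []) j "" == "")).map
        (fun j => t.take k
          ++ [PySem.List.slice (t.getD k []) none (some j) ++ [p]
              ++ PySem.List.slice (t.getD k []) (some (j + 1)) none]
          ++ t.drop (k + 1))) := by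
  induction t with
  | nil => simp [pvG]
  | cons h tl ih =>
    simp only [pvG, List.length_cons, List.range_succ_eq_map, List.flatMap_cons,
      List.flatMap_map, ih, List.map_flatMap]
    congr 1
    all_goals simp [Function.comp_def]

-- A's flat characterisation (append-if foldl = filter/map flatMap)
theorem state_list_func_eq_flat (t : List (List String)) (p : String) :
    state_list_func t p
      = (PySem.List.pyRange 0 t.length 1).flatMap (fun i =>
          ((PySem.List.pyRange 0 t.length 1).filter
            (fun j => PySem.List.pyGetD (PySem.List.pyGetD t i []) j "" == "")).map
            (fun j => PySem.List.pySetD t i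
              (PySem.List.pySetD (PySem.List.pyGetD t i []) j p))) := by
  unfold state_list_func
  simp only [PySem.List.foldl_append_if, PySem.List.foldl_append_eq_flatMap]
  simp

-- the board A builds for empty cell (k, j) equals the board B assembles from shared rows
theorem pv_cell_eq (t : List (List String)) (p : String) (k : Nat) (j : Int)
    (hpre : ∀ row ∈ t, t.length ≤ row.length)
    (hk : k < t.length) (hj0 : 0 ≤ j) (hjn : j < t.length) :
    t.set k (PySem.List.pySetD (t.getD k []) j p)
      = t.take k
        ++ [PySem.List.slice (t.getD k []) none (some j) ++ [p]
            ++ PySem.List.slice (t.getD k []) (some (j + 1)) none]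
        ++ t.drop (k + 1) := by
  have hrow : t.getD k [] = t[k]'hk := List.getD_eq_getElem _ _ hk
  have hlen : t.length ≤ (t[k]'hk).length := hpre _ (List.getElem_mem hk)
  have hjN : j.toNat < (t[k]'hk).length := by omega
  rw [hrow, PySem.List.pySetD_of_nonneg _ p hj0,
      PySem.List.slice_to _ hj0, PySem.List.slice_from _ (by omega : (0:Int) ≤ j + 1)]
  have h2 : (j + 1).toNat = j.toNat + 1 := by omega
  rw [h2, List.set_eq_take_append_cons_drop, if_pos hk,
      List.set_eq_take_append_cons_drop, if_pos hjN]
  simp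

-- ===== VERDICT (by name: the statement is the Claim_ definition above) =====
theorem state_list_func_spec : Claim_equal_state_list_func := by
  intro t p _ hpre
  unfold Spec_state_list_func
  rw [state_list_func_eq_flat, pv_alt_eq_pvG, pvG_eq_flat,
      PySem.List.pyRange_zero_natCast, List.flatMap_map]
  apply List.flatMap_congr
  intro k hk
  have hk' : k < t.length := List.mem_range.mp hk
  simp only [PySem.List.pyGetD_natCast, PySem.List.pySetD_natCast]
  apply List.map_congr_left
  intro j hj
  have hj' := List.mem_of_mem_filter hj
  simp only [List.mem_map, List.mem_range] at hj'
  obtain ⟨m, hm, rfl⟩ := hj'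
  exact pv_cell_eq t p k (↑m) hpre hk' (by positivity) (by exact_mod_cast hm)
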